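-- pv_equiv track=rewrite | github.com/jakubkoziel/KGconstruction | NERs/utils_NER.py | get_all_sentences_with_position
-- ===== SOURCE A (Python) =====
-- def get_all_sentences_with_position(text):
--     sent_positions = [0]
--
--     all_sentences = []
--     for sent in text:
--         all_sentences += sent
--         sent_positions.append(len(sent))
--
--     for cumulative in range(1, len(sent_positions)):
--         sent_positions[cumulative] += sent_positions[cumulative - 1]
--
--     return all_sentences, sent_positions
-- ===== SOURCE B (Python) =====
-- def get_all_sentences_with_position(text):
--     all_sentences = []
--     sent_positions = [0]
--     pos = 0
--     for sent in text:
--         all_sentences.extend(sent)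
--         pos += len(sent)
--         sent_positions.append(pos)
--     return all_sentences, sent_positions
-- ===== Notes on version B (the rewrite author's own statement) =====
-- stated objective: simpler
-- what changed: Single forward pass threading a running cumulative offset instead of recording raw lengths and then rewriting them with a second in-place prefix-sum loop.
import Mathlib
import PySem

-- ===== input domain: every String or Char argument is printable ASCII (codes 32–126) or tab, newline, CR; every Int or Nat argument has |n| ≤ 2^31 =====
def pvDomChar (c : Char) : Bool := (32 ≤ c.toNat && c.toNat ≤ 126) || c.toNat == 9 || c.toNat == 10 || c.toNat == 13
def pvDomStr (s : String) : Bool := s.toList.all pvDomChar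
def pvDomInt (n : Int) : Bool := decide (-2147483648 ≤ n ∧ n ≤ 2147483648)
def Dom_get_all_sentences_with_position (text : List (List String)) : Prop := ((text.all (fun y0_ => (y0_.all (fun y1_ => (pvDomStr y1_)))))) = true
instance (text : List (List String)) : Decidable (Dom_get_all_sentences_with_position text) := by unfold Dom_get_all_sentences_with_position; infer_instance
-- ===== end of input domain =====

-- B is a single forward pass threading a running cumulative offset; A's two-loop build-then-prefix-sum is replaced (simpler decomposition, same cost).

-- ===== PORT A =====
-- first loop: all_sentences += sent; sent_positions.append(len(sent))
def pvAStep (st : List String × List Int) (sent : List String) : List String × List Int :=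
  (st.1 ++ sent, st.2 ++ [(sent.length : Int)])

-- second loop: for cumulative in range(1, len(sent_positions)): sent_positions[cumulative] += sent_positions[cumulative-1]
def pvAFix (sp : List Int) : List Int :=
  (PySem.List.pyRange 1 (sp.length : Int) 1).foldl
    (fun acc i => PySem.List.pySetD acc i (PySem.List.pyGetD acc i 0 + PySem.List.pyGetD acc (i - 1) 0)) sp

def get_all_sentences_with_position (text : List (List String)) : List String × List Int :=
  let st := text.foldl pvAStep ([], [0])
  (st.1, pvAFix st.2)

-- ===== PORT B =====
def pvBStep (st : List String × List Int × Int) (sent : List String) : List String × List Int × Int :=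
  let pos := st.2.2 + (sent.length : Int)
  (st.1 ++ sent, st.2.1 ++ [pos], pos)

def get_all_sentences_with_position_alt (text : List (List String)) : List String × List Int :=
  let st := text.foldl pvBStep ([], [0], 0)
  (st.1, st.2.1)

-- ===== PRECONDITION & SPEC =====
def Spec_get_all_sentences_with_position (text : List (List String)) (out : List String × List Int) : Prop := out = get_all_sentences_with_position_alt text
instance (text : List (List String)) (out : List String × List Int) : Decidable (Spec_get_all_sentences_with_position text out) := by unfold Spec_get_all_sentences_with_position; infer_instance

-- ===== CLAIM (what is proved, stated in full; the proofs are below) =====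
def Claim_equal_get_all_sentences_with_position : Prop := ∀ (text : List (List String)), Dom_get_all_sentences_with_position text → Spec_get_all_sentences_with_position text (get_all_sentences_with_position text)

-- ===== LEMMAS AND PROOFS =====

/-- cumulative sums with carry `c` (exclusive of `c` itself). -/
def pvScan (c : Int) : List Int → List Int
  | [] => []
  | x :: xs => (c + x) :: pvScan (c + x) xs

theorem pvAStep_fold (text : List (List String)) :
    ∀ (a : List String) (b : List Int),
      text.foldl pvAStep (a, b) = (a ++ text.flatten, b ++ text.map (fun s => (s.length : Int))) := by
  induction text with
  | nil => intro a b; simp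
  | cons s t ih => intro a b; simp [pvAStep, ih]

theorem pvBStep_fold (text : List (List String)) :
    ∀ (a : List String) (b : List Int) (c : Int),
      text.foldl pvBStep (a, b, c)
        = (a ++ text.flatten, b ++ pvScan c (text.map (fun s => (s.length : Int))),
           c + ((text.map (fun s => (s.length : Int))).sum)) := by
  induction text with
  | nil => intro a b c; simp [pvScan]
  | cons s t ih => intro a b c; simp [pvBStep, ih, pvScan]; ring

theorem pvAFix_go (t : List Int) : ∀ (q : List Int) (c : Int),
    (PySem.List.pyRange ((q.length + 1 : Nat) : Int) ((q.length + 1 + t.length : Nat) : Int) 1).foldl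
      (fun acc i => PySem.List.pySetD acc i (PySem.List.pyGetD acc i 0 + PySem.List.pyGetD acc (i - 1) 0))
      (q ++ c :: t)
    = q ++ c :: pvScan c t := by
  induction t with
  | nil =>
    intro q c
    rw [PySem.List.pyRange_one_eq_nil (by simp)]
    simp [pvScan]
  | cons x xs ih =>
    intro q c
    rw [PySem.List.pyRange_one_cons (a := ((q.length + 1 : Nat) : Int)) (b := ((q.length + 1 + (x :: xs).length : Nat) : Int)) (by simp only [List.length_cons]; push_cast; omega)]
    simp only [List.foldl_cons]
    have hget : PySem.List.pyGetD (q ++ c :: x :: xs) ((q.length + 1 : Nat) : Int) 0 = x := by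
      rw [PySem.List.pyGetD_eq_getElem (i := ((q.length + 1 : Nat) : Int)) _ _ (by push_cast; omega) (by simp only [List.length_append, List.length_cons]; push_cast; omega)]
      simp [List.getElem_append_right]
    have hget' : PySem.List.pyGetD (q ++ c :: x :: xs) (((q.length + 1 : Nat) : Int) - 1) 0 = c := by
      have : (((q.length + 1 : Nat) : Int) - 1) = ((q.length : Nat) : Int) := by push_cast; ring
      rw [this, PySem.List.pyGetD_eq_getElem (i := ((q.length : Nat) : Int)) _ _ (by push_cast; omega) (by simp only [List.length_append, List.length_cons]; push_cast; omega)]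
      simp [List.getElem_append_right]
    rw [hget, hget']
    rw [PySem.List.pySetD_of_nonneg (i := ((q.length + 1 : Nat) : Int)) _ _ (by omega)]
    have hset : (q ++ c :: x :: xs).set ((q.length + 1 : Nat) : Int).toNat (x + c)
        = (q ++ [c]) ++ (c + x) :: xs := by
      rw [Int.toNat_natCast]
      rw [show q.length + 1 = (q ++ [c]).length by simp]
      rw [show q ++ c :: x :: xs = (q ++ [c]) ++ x :: xs by simp]
      rw [List.set_append_right _ _ (by simp)]
      simp [Int.add_comm]
    rw [hset]
    have := ih (q ++ [c]) (c + x)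
    simp only [List.length_append, List.length_cons, List.length_nil] at this ⊢
    have harg : ((q.length + 1 : Nat) : Int) + 1 = ((q.length + 0 + 1 + 1 : Nat) : Int) := by push_cast; ring
    have harg2 : ((q.length + 1 + (xs.length + 1) : Nat) : Int) = ((q.length + 0 + 1 + 1 + xs.length : Nat) : Int) := by push_cast; ring
    rw [harg, harg2, this]
    simp [pvScan]

theorem pvAFix_scan (t : List Int) : pvAFix (0 :: t) = 0 :: pvScan 0 t := by
  have := pvAFix_go t [] 0
  simp only [List.length_nil, List.nil_append] at this
  unfold pvAFix
  rw [show ((0 :: t).length : Int) = ((1 + t.length : Nat) : Int) by simp; omega]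
  simpa using this

-- ===== VERDICT (by name: the statement is the Claim_ definition above) =====
theorem get_all_sentences_with_position_spec : Claim_equal_get_all_sentences_with_position := by
  intro text _
  unfold Spec_get_all_sentences_with_position get_all_sentences_with_position get_all_sentences_with_position_alt
  rw [pvAStep_fold, pvBStep_fold]
  simp [pvAFix_scan]
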